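-- pv_equiv track=rewrite | github.com/VOID1793/browser_ai | src/browser_ai/prompt.py | reorder_user_message
-- ===== SOURCE A (Python) =====
-- def reorder_user_message(user_content: str) -> str:
--     """
--     Reorder a user message that embeds a file block before the instruction.
--
--     Continue and similar IDE extensions produce messages shaped like:
--
--         ```lang path/to/file (lines N-M)
--         <file contents — may contain inner fenced blocks>
--         ```
--         <actual user instruction>
--
--     Because the file block dominates, the LLM often ignores the instruction.
--     This function moves the instruction to the front:
--
--         <actual instruction>
--
--         Here is the relevant file context:
--         ```lang path/to/file (lines N-M)
--         <file contents>
--         ```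
--
--     Algorithm:
--       - The FIRST line that starts with ``` is the outer opener.
--       - The outer closer is the LAST line that is exactly ``` (nothing after).
--         This works because inner closing fences are always followed by more
--         content, while the outer closer is the final ``` in the message.
--       - Everything after the outer closer is the instruction.
--       - Requires at least 3 words of instruction to avoid spurious reordering.
--
--     This function MUST only be called on the raw user message string, not on
--     an assembled prompt that already has system-instruction text prepended.
--     """
--     content = user_content.strip()
--     lines = content.splitlines()
--
--     # Find the first line that opens a fenced block (starts with ```)
--     opener_idx = None
--     for i, line in enumerate(lines):
--         if line.strip().startswith("```"):
--             opener_idx = i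
--             break
--
--     if opener_idx is None:
--         return content
--
--     # Find the LAST line that is a bare closing fence (exactly ```)
--     closer_idx = None
--     for i in range(len(lines) - 1, opener_idx, -1):
--         if lines[i].strip() == "```":
--             closer_idx = i
--             break
--
--     if closer_idx is None or closer_idx <= opener_idx:
--         return content
--
--     # Everything after the closer is the instruction
--     instruction = "\n".join(lines[closer_idx + 1:]).strip()
--
--     # Require at least 3 words of meaningful instruction
--     if len(instruction.split()) < 3:
--         return content
--
--     code_block = "\n".join(lines[opener_idx : closer_idx + 1])
--     return f"{instruction}\n\nHere is the relevant file context:\n\n{code_block}"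
-- ===== SOURCE B (Python) =====
-- def reorder_user_message(user_content: str) -> str:
--     """Single streaming pass: a small state machine over the lines that
--     accumulates the code block and the trailing instruction as segments,
--     flushing the pending tail into the block whenever a bare ``` fence is
--     seen.  No indices, no slicing, no backward scan."""
--     content = user_content.strip()
--
--     pre = True      # still before the opening fence
--     closed = False  # a bare closing fence after the opener has been seen
--     block = []      # lines from the opener through the latest bare fence
--     tail = []       # lines after the latest bare fence
--
--     for line in content.splitlines():
--         s = line.strip()
--         if pre:
--             if s.startswith("```"):
--                 pre = False
--                 block.append(line)
--             # lines before the opener never appear in the output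
--         elif s == "```":
--             closed = True
--             block.extend(tail)
--             block.append(line)
--             tail = []
--         else:
--             tail.append(line)
--
--     if pre or not closed:
--         return content
--
--     instruction = "\n".join(tail).strip()
--     if len(instruction.split()) < 3:
--         return content
--
--     code_block = "\n".join(block)
--     return f"{instruction}\n\nHere is the relevant file context:\n\n{code_block}"
-- ===== Notes on version B (the rewrite author's own statement) =====
-- stated objective: alternative
-- what changed: B replaces A's two opposite-direction index scans plus list slicing by a single streaming state machine over the lines that accumulates the code-block and instruction segments directly, flushing the pending tail into the block at each bare ``` fence (no indices, no slices, no backward scan).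
import Mathlib
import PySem

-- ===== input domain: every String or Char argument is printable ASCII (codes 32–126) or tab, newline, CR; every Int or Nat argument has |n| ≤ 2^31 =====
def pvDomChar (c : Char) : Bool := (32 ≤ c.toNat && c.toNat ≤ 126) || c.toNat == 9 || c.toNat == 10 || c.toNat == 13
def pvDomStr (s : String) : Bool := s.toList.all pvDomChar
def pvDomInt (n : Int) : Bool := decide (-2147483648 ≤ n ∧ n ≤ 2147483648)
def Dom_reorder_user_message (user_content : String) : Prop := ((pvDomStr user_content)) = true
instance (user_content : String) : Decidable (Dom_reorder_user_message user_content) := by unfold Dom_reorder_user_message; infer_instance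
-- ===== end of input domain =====

-- B replaces A's two opposite-direction index scans and slicing by ONE streaming state machine
-- over the lines that accumulates the code block and the instruction tail as segments. Same cost.

-- ===== PORT A =====
-- A's first loop: first line whose strip() starts with "```" (index carried along)
def aOpener : List String → Nat → Option Nat
  | [], _ => none
  | l :: ls, i =>
    if PySem.Str.startswith (PySem.Str.strip l) "```" then some i else aOpener ls (i + 1)

-- A's second loop: for i in range(len-1, opener, -1): first (from the top) bare ``` line.
-- lines[i] is always in range here, so getD is exact.
def aCloser (lines : List String) (opener i : Nat) : Option Nat :=
  if i ≤ opener then none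
  else if PySem.Str.strip (lines.getD i "") == "```" then some i
  else aCloser lines opener (i - 1)
termination_by i
decreasing_by omega

def reorder_user_message (user_content : String) : String :=
  let content := PySem.Str.strip user_content
  let lines := PySem.Str.splitlines content
  match aOpener lines 0 with
  | none => content
  | some opener_idx =>
    match aCloser lines opener_idx (lines.length - 1) with
    | none => content
    | some closer_idx =>
      if closer_idx ≤ opener_idx then content
      else
        -- lines[closer_idx+1:] and lines[opener_idx:closer_idx+1]
        let instruction := PySem.Str.strip
          (PySem.Str.join "\n" (PySem.List.slice lines (some ((closer_idx : Int) + 1)) none))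
        if (PySem.Str.split₀ instruction).length < 3 then content
        else
          let code_block := PySem.Str.join "\n"
            (PySem.List.slice lines (some (opener_idx : Int)) (some ((closer_idx : Int) + 1)))
          instruction ++ "\n\nHere is the relevant file context:\n\n" ++ code_block

-- ===== PORT B =====
-- Source B's loop body: state = (pre, closed, block, tail)
def bStep (st : Bool × Bool × List String × List String) (line : String) :
    Bool × Bool × List String × List String :=
  let s := PySem.Str.strip line
  match st with
  | (pre, closed, block, tail) =>
    if pre then
      if PySem.Str.startswith s "```" then (false, closed, block ++ [line], tail)
      else (pre, closed, block, tail)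
    else if s == "```" then (false, true, block ++ tail ++ [line], ([] : List String))
    else (false, closed, block, tail ++ [line])

def reorder_user_message_alt (user_content : String) : String :=
  let content := PySem.Str.strip user_content
  match (PySem.Str.splitlines content).foldl bStep (true, false, [], []) with
  | (pre, closed, block, tail) =>
    if pre || !closed then content
    else
      let instruction := PySem.Str.strip (PySem.Str.join "\n" tail)
      if (PySem.Str.split₀ instruction).length < 3 then content
      else
        instruction ++ "\n\nHere is the relevant file context:\n\n" ++ PySem.Str.join "\n" block

-- ===== PRECONDITION & SPEC =====
def Spec_reorder_user_message (user_content : String) (out : String) : Prop := out = reorder_user_message_alt user_content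
instance (user_content : String) (out : String) : Decidable (Spec_reorder_user_message user_content out) := by unfold Spec_reorder_user_message; infer_instance

-- ===== CLAIM (what is proved, stated in full; the proofs are below) =====
def Claim_equal_reorder_user_message : Prop := ∀ (user_content : String), Dom_reorder_user_message user_content → Spec_reorder_user_message user_content (reorder_user_message user_content)

-- ===== LEMMAS AND PROOFS =====

theorem bStep_pre (closed : Bool) (block tail : List String) (x : String) :
    bStep (true, closed, block, tail) x =
      if PySem.Str.startswith (PySem.Str.strip x) "```" then (false, closed, block ++ [x], tail)
      else (true, closed, block, tail) := by
  simp [bStep]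

theorem bStep_open (closed : Bool) (block tail : List String) (x : String) :
    bStep (false, closed, block, tail) x =
      if PySem.Str.strip x == "```" then (false, true, block ++ tail ++ [x], [])
      else (false, closed, block, tail ++ [x]) := by
  simp [bStep]

theorem aOpener_append (x : String) (ls : List String) (i : Nat) :
    aOpener (ls ++ [x]) i =
      match aOpener ls i with
      | some o => some o
      | none => if PySem.Str.startswith (PySem.Str.strip x) "```" then some (i + ls.length) else none := by
  induction ls generalizing i with
  | nil => simp [aOpener]
  | cons l ls ih =>
    simp only [List.cons_append, aOpener]
    split
    · rfl
    · rw [ih]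
      cases aOpener ls (i + 1) with
      | none =>
        dsimp only
        split
        · simp; omega
        · rfl
      | some o => rfl

theorem aOpener_lt (ls : List String) (i o : Nat) (h : aOpener ls i = some o) :
    i ≤ o ∧ o < i + ls.length := by
  induction ls generalizing i with
  | nil => simp [aOpener] at h
  | cons l ls ih =>
    simp only [aOpener] at h
    split at h
    · cases h; simp
    · have := ih (i + 1) h
      simp; omega

theorem aCloser_congr (ls ls' : List String) (o i : Nat)
    (h : ∀ m, m ≤ i → ls.getD m "" = ls'.getD m "") :
    aCloser ls o i = aCloser ls' o i := by
  induction i using Nat.strong_induction_on with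
  | _ i ih =>
    conv_lhs => rw [aCloser]
    conv_rhs => rw [aCloser]
    rw [h i (le_refl i)]
    split
    · rfl
    · split
      · rfl
      · exact ih (i - 1) (by omega) (fun m hm => h m (by omega))

theorem aCloser_gt (ls : List String) (o i c : Nat) (h : aCloser ls o i = some c) :
    o < c ∧ c ≤ i := by
  induction i using Nat.strong_induction_on with
  | _ i ih =>
    rw [aCloser] at h
    split at h
    · cases h
    · split at h
      · cases h; rename_i h1 _; omega
      · have := ih (i - 1) (by rename_i h1 _; omega) h
        omega

theorem getD_append_left (ls : List String) (x : String) (m : Nat) (h : m < ls.length) :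
    (ls ++ [x]).getD m "" = ls.getD m "" := by
  simp [List.getD, List.getElem?_append_left h]

theorem getD_append_self (ls : List String) (x : String) :
    (ls ++ [x]).getD ls.length "" = x := by
  simp [List.getD]

theorem aCloser_append (x : String) (ls : List String) (o : Nat) (ho : o < ls.length) :
    aCloser (ls ++ [x]) o ls.length =
      if PySem.Str.strip x == "```" then some ls.length else aCloser ls o (ls.length - 1) := by
  rw [aCloser]
  rw [if_neg (by omega), getD_append_self]
  split
  · rfl
  · exact aCloser_congr _ _ _ _ (fun m hm => getD_append_left ls x m (by omega))

theorem join_segments (ls : List String) (o c : Nat) (h1 : o ≤ c + 1) (h2 : c < ls.length) :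
    (ls.take (c + 1)).drop o ++ ls.drop (c + 1) = ls.drop o := by
  have hmin : (ls.take (c + 1)).length = c + 1 - o + o := by simp; omega
  apply List.ext_getElem
  · simp; omega
  · intro n h3 h4
    by_cases hn : n < (ls.take (c + 1)).length - o
    · rw [List.getElem_append_left (by simp at hn ⊢; omega)]
      simp only [List.getElem_drop, List.getElem_take]
    · rw [List.getElem_append_right (by simp at hn ⊢; omega)]
      simp only [List.getElem_drop]
      congr 1
      simp at hn ⊢
      omega

-- the single streaming pass computes exactly A's (opener, closer) decomposition
theorem fold_char (ls : List String) :
    ls.foldl bStep (true, false, ([] : List String), ([] : List String)) =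
      match aOpener ls 0 with
      | none => (true, false, [], [])
      | some o =>
        match aCloser ls o (ls.length - 1) with
        | none => (false, false, (ls.take (o + 1)).drop o, ls.drop (o + 1))
        | some c => (false, true, (ls.take (c + 1)).drop o, ls.drop (c + 1)) := by
  induction ls using List.reverseRecOn with
  | nil => simp [aOpener]
  | append_singleton ls x ih =>
    rw [List.foldl_append, List.foldl_cons, List.foldl_nil, ih, aOpener_append]
    have hlen1 : (ls ++ [x]).length - 1 = ls.length := by simp
    cases hop : aOpener ls 0 with
    | none =>
      dsimp only
      rw [bStep_pre]
      by_cases hx : PySem.Str.startswith (PySem.Str.strip x) "```" = true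
      · rw [if_pos hx, if_pos hx]
        dsimp only
        have hcl : aCloser (ls ++ [x]) (0 + ls.length) ((ls ++ [x]).length - 1) = none := by
          rw [aCloser, if_pos (by simp)]
        rw [hcl]
        dsimp only
        have h1 : ((ls ++ [x]).take (0 + ls.length + 1)).drop (0 + ls.length) = [x] := by
          rw [List.take_of_length_le (by simp), List.drop_append_of_le_length (by omega)]
          simp
        have h2 : (ls ++ [x]).drop (0 + ls.length + 1) = [] := by
          apply List.drop_eq_nil_of_le; simp
        rw [h1, h2]
        simp
      · rw [if_neg hx, if_neg hx]
    | some o =>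
      dsimp only
      obtain ⟨-, holen⟩ := aOpener_lt ls 0 o hop
      rw [Nat.zero_add] at holen
      rw [hlen1, aCloser_append x ls o holen]
      cases hcl : aCloser ls o (ls.length - 1) with
      | none =>
        dsimp only
        rw [bStep_open]
        by_cases hx : (PySem.Str.strip x == "```") = true
        · rw [if_pos hx, if_pos hx]
          dsimp only
          have h1 : ((ls ++ [x]).take (ls.length + 1)).drop o = ls.drop o ++ [x] := by
            rw [List.take_of_length_le (by simp), List.drop_append_of_le_length (by omega)]
          have h2 : (ls ++ [x]).drop (ls.length + 1) = [] := by
            apply List.drop_eq_nil_of_le; simp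
          rw [h1, h2, join_segments ls o o (by omega) (by omega)]
        · rw [if_neg hx, if_neg hx]
          dsimp only
          have h1 : ((ls ++ [x]).take (o + 1)).drop o = (ls.take (o + 1)).drop o := by
            rw [List.take_append_of_le_length (by omega)]
          have h2 : (ls ++ [x]).drop (o + 1) = ls.drop (o + 1) ++ [x] := by
            rw [List.drop_append_of_le_length (by omega)]
          rw [h1, h2]
      | some c =>
        obtain ⟨hoc, hcle⟩ := aCloser_gt ls o (ls.length - 1) c hcl
        have hclen : c < ls.length := by omega
        dsimp only
        rw [bStep_open]
        by_cases hx : (PySem.Str.strip x == "```") = true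
        · rw [if_pos hx, if_pos hx]
          dsimp only
          have h1 : ((ls ++ [x]).take (ls.length + 1)).drop o = ls.drop o ++ [x] := by
            rw [List.take_of_length_le (by simp), List.drop_append_of_le_length (by omega)]
          have h2 : (ls ++ [x]).drop (ls.length + 1) = [] := by
            apply List.drop_eq_nil_of_le; simp
          rw [h1, h2, join_segments ls o c (by omega) (by omega)]
        · rw [if_neg hx, if_neg hx]
          dsimp only
          have h1 : ((ls ++ [x]).take (c + 1)).drop o = (ls.take (c + 1)).drop o := by
            rw [List.take_append_of_le_length (by omega)]
          have h2 : (ls ++ [x]).drop (c + 1) = ls.drop (c + 1) ++ [x] := by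
            rw [List.drop_append_of_le_length (by omega)]
          rw [h1, h2]

theorem reorder_eq (user_content : String) :
    reorder_user_message user_content = reorder_user_message_alt user_content := by
  unfold reorder_user_message reorder_user_message_alt
  dsimp only
  generalize PySem.Str.strip user_content = content
  generalize PySem.Str.splitlines content = lines
  rw [fold_char]
  cases hop : aOpener lines 0 with
  | none => simp
  | some o =>
    obtain ⟨-, holen⟩ := aOpener_lt lines 0 o hop
    rw [Nat.zero_add] at holen
    cases hcl : aCloser lines o (lines.length - 1) with
    | none => simp [hcl]
    | some c =>
      obtain ⟨hoc, hcle⟩ := aCloser_gt lines o (lines.length - 1) c hcl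
      simp only [hcl]
      rw [if_neg (by omega)]
      have hslice1 : PySem.List.slice lines (some ((c : Int) + 1)) none = lines.drop (c + 1) := by
        have h1 : ((c : Int) + 1) = ((c + 1 : Nat) : Int) := by push_cast; ring
        rw [h1, PySem.List.slice_from_natCast]
      have hslice2 : PySem.List.slice lines (some (o : Int)) (some ((c : Int) + 1)) =
          (lines.take (c + 1)).drop o := by
        have h1 : ((c : Int) + 1) = ((c + 1 : Nat) : Int) := by push_cast; ring
        rw [h1, PySem.List.slice_natCast, List.drop_take]
      rw [hslice1, hslice2]
      simp

-- ===== VERDICT (by name: the statement is the Claim_ definition above) =====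
theorem reorder_user_message_spec : Claim_equal_reorder_user_message := by
  intro user_content _
  unfold Spec_reorder_user_message
  exact reorder_eq user_content
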